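-- pv_equiv track=rewrite | github.com/mjun0812/docstring2markdown | docstring2markdown/parser.py | _is_module_ignored
-- ===== SOURCE A (Python) =====
-- def _is_module_ignored(module_name, ignored_modules) -> bool:
--     """Checks if a given module is ignored."""
--     if module_name.split(".")[-1].startswith("_"):
--         return True
--
--     for ignored_module in ignored_modules:
--         if module_name == ignored_module:
--             return True
--
--         # Check is module is subpackage of an ignored package
--         if module_name.startswith(ignored_module + "."):
--             return True
--
--     return False
-- ===== SOURCE B (Python) =====
-- def _is_module_ignored(module_name, ignored_modules) -> bool:
--     """Checks if a given module is ignored."""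
--     if module_name.split(".")[-1].startswith("_"):
--         return True
--
--     ignored = set(ignored_modules)
--     if module_name in ignored:
--         return True
--
--     # module_name is a subpackage of an ignored package iff some prefix of it
--     # ending just before a "." is in the ignored set.
--     return any(
--         module_name[:k] in ignored
--         for k in range(len(module_name))
--         if module_name[k] == "."
--     )
-- ===== Notes on version B (the rewrite author's own statement) =====
-- stated objective: alternative
-- what changed: B builds a set of the ignored modules once and scans the dotted prefixes of module_name against it, instead of scanning ignored_modules with == and startswith per element.
import Mathlib
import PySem

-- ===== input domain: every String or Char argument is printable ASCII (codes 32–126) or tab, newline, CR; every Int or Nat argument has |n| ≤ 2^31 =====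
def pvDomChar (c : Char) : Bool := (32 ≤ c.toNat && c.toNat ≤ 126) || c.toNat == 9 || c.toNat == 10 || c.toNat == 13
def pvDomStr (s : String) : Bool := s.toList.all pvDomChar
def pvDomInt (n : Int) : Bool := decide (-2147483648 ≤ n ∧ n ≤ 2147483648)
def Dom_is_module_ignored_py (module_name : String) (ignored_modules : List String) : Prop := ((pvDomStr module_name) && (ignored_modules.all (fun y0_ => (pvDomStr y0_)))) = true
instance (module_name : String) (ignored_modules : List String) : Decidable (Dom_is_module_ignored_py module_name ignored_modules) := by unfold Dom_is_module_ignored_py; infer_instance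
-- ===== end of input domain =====

-- B scans the dotted prefixes of module_name against a set built once from ignored_modules,
-- instead of A's per-element == / startswith scan of ignored_modules (objective: alternative).

-- ===== PORT A =====
-- the 'for ignored_module in ignored_modules' loop of A
def isModIgnoredLoopA (module_name : String) : List String → Bool
  | [] => false
  | g :: rest =>
    if module_name == g then true
    -- module_name.startswith(ignored_module + "."): exact, since
    -- Str.startswith s p = Chars.startswith s.toList p.toList and (g ++ ".").toList = g.toList ++ ['.']
    else if PySem.Chars.startswith module_name.toList (g.toList ++ ['.']) then true
    else isModIgnoredLoopA module_name rest

def is_module_ignored_py (module_name : String) (ignored_modules : List String) : Bool :=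
  -- module_name.split(".")[-1].startswith("_"); split? is some (sep ≠ "") and nonempty, so the defaults never fire
  let parts := (PySem.Str.split? module_name ".").getD []
  if PySem.Str.startswith ((PySem.List.pyGet? parts (-1)).getD "") "_" then true
  else isModIgnoredLoopA module_name ignored_modules

-- ===== PORT B =====
def is_module_ignored_py_alt (module_name : String) (ignored_modules : List String) : Bool :=
  let parts := (PySem.Str.split? module_name ".").getD []
  if PySem.Str.startswith ((PySem.List.pyGet? parts (-1)).getD "") "_" then true
  else
    let ignored := PySem.Set.ofList ignored_modules
    if PySem.Set.contains ignored module_name then true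
    else
      (PySem.List.pyRange 0 (PySem.Str.len module_name) 1).any (fun k =>
        (PySem.Str.pyGet? module_name k == some '.')
          && PySem.Set.contains ignored (PySem.Str.slice module_name none (some k)))

-- ===== PRECONDITION & SPEC =====
def Spec_is_module_ignored_py (module_name : String) (ignored_modules : List String) (out : Bool) : Prop := out = is_module_ignored_py_alt module_name ignored_modules
instance (module_name : String) (ignored_modules : List String) (out : Bool) : Decidable (Spec_is_module_ignored_py module_name ignored_modules out) := by unfold Spec_is_module_ignored_py; infer_instance

-- ===== CLAIM (what is proved, stated in full; the proofs are below) =====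
def Claim_equal_is_module_ignored_py : Prop := ∀ (module_name : String) (ignored_modules : List String), Dom_is_module_ignored_py module_name ignored_modules → Spec_is_module_ignored_py module_name ignored_modules (is_module_ignored_py module_name ignored_modules)

-- ===== LEMMAS AND PROOFS =====

-- A's loop is true iff some ignored module equals module_name or is a dotted ancestor of it
lemma loopA_iff (m : String) (ig : List String) :
    isModIgnoredLoopA m ig = true ↔
      ∃ g ∈ ig, m = g ∨ (g.toList ++ ['.']) <+: m.toList := by
  induction ig with
  | nil => simp [isModIgnoredLoopA]
  | cons g rest ih =>
    simp only [isModIgnoredLoopA]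
    split_ifs with h1 h2
    · exact iff_of_true rfl ⟨g, List.mem_cons_self, Or.inl (by simpa using h1)⟩
    · exact iff_of_true rfl
        ⟨g, List.mem_cons_self, Or.inr ((PySem.Chars.startswith_iff _ _).mp h2)⟩
    · rw [ih]
      constructor
      · rintro ⟨g', hg', h⟩
        exact ⟨g', List.mem_cons_of_mem _ hg', h⟩
      · rintro ⟨g', hg', h⟩
        rcases List.mem_cons.mp hg' with hg' | hg'
        · subst hg'
          rcases h with h | h
          · exact absurd (by simp [h]) h1
          · exact absurd ((PySem.Chars.startswith_iff _ _).mpr h) h2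
        · exact ⟨g', hg', h⟩

-- p followed by '.' is a prefix of cs iff cs has '.' at position p.length and p is cs up to there
lemma prefix_dot_iff (p cs : List Char) :
    (p ++ ['.']) <+: cs ↔ cs[p.length]? = some '.' ∧ p = cs.take p.length := by
  constructor
  · rintro ⟨t, ht⟩
    subst ht
    rw [List.append_assoc]
    refine ⟨?_, by simp⟩
    rw [List.getElem?_append_right (le_refl _)]
    simp
  · rintro ⟨h1, h2⟩
    have hlen : p.length < cs.length := by
      by_contra h
      rw [List.getElem?_eq_none (by omega)] at h1
      simp at h1
    refine ⟨cs.drop (p.length + 1), ?_⟩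
    conv_rhs => rw [← List.take_append_drop (p.length + 1) cs]
    rw [List.take_add_one, h1]
    simp [← h2]

-- existence of an ignored dotted ancestor, re-indexed by the position of the separating '.'
lemma exists_ancestor_iff (m : String) (ig : List String) :
    (∃ g ∈ ig, (g.toList ++ ['.']) <+: m.toList) ↔
      ∃ k : Nat, k < m.toList.length ∧ m.toList[k]? = some '.' ∧
        String.ofList (m.toList.take k) ∈ ig := by
  constructor
  · rintro ⟨g, hg, hpre⟩
    rw [prefix_dot_iff] at hpre
    obtain ⟨h1, h2⟩ := hpre
    refine ⟨g.toList.length, ?_, h1, ?_⟩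
    · by_contra h
      rw [List.getElem?_eq_none (by omega)] at h1
      simp at h1
    · rw [← h2, String.ofList_toList]; exact hg
  · rintro ⟨k, hk, hdot, hmem⟩
    refine ⟨String.ofList (m.toList.take k), hmem, ?_⟩
    rw [prefix_dot_iff, String.toList_ofList]
    have hl : (m.toList.take k).length = k := by rw [List.length_take]; omega
    rw [hl]
    exact ⟨hdot, rfl⟩

-- module_name[:k] for 0 ≤ k is the string of the first k characters
lemma slice_take (m : String) (k : Nat) :
    PySem.Str.slice m none (some (k : Int)) = String.ofList (m.toList.take k) := by
  unfold PySem.Str.slice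
  rw [show PySem.Chars.slice m.toList none (some (k:Int)) = m.toList.take k by
    have h := PySem.List.slice_to m.toList (b := (k:Int)) (by omega)
    simp only [Int.toNat_natCast] at h
    exact h]

-- ===== VERDICT (by name: the statement is the Claim_ definition above) =====
theorem is_module_ignored_py_spec : Claim_equal_is_module_ignored_py := by
  intro m ig _
  unfold Spec_is_module_ignored_py is_module_ignored_py is_module_ignored_py_alt
  dsimp only
  split_ifs with hguard hmem
  · rfl
  · rw [PySem.Set.contains_iff, PySem.Set.mem_ofList] at hmem
    rw [loopA_iff]
    exact ⟨m, hmem, Or.inl rfl⟩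
  · rw [Bool.eq_iff_iff, loopA_iff, List.any_eq_true]
    constructor
    · rintro ⟨g, hg, h | h⟩
      · subst h
        rw [PySem.Set.contains_iff, PySem.Set.mem_ofList] at hmem
        exact absurd hg hmem
      · obtain ⟨k, hk, hdot, hm⟩ := (exists_ancestor_iff m ig).mp ⟨g, hg, h⟩
        refine ⟨(k : Int), ?_, ?_⟩
        · rw [PySem.List.mem_pyRange_one, PySem.Str.len_eq]
          constructor <;> omega
        · rw [Bool.and_eq_true, PySem.Set.contains_iff, PySem.Set.mem_ofList]
          refine ⟨?_, ?_⟩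
          · rw [beq_iff_eq, PySem.Str.pyGet?_eq]
            simp only [PySem.Chars.pyGet?]
            rw [PySem.List.pyGet?_natCast]
            exact hdot
          · rw [slice_take]; exact hm
    · rintro ⟨k, hk, hpk⟩
      rw [PySem.List.mem_pyRange_one, PySem.Str.len_eq] at hk
      rw [Bool.and_eq_true, beq_iff_eq, PySem.Set.contains_iff, PySem.Set.mem_ofList,
          PySem.Str.pyGet?_eq] at hpk
      obtain ⟨hdot, hmem'⟩ := hpk
      have hknat : k = ((k.toNat : Nat) : Int) := by omega
      rw [hknat] at hdot hmem'
      rw [slice_take] at hmem'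
      have hdot' : m.toList[k.toNat]? = some '.' := by
        simp only [PySem.Chars.pyGet?] at hdot
        rwa [PySem.List.pyGet?_natCast] at hdot
      obtain ⟨g, hg, hpre⟩ := (exists_ancestor_iff m ig).mpr ⟨k.toNat, by omega, hdot', hmem'⟩
      exact ⟨g, hg, Or.inr hpre⟩
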